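-- pv_equiv track=rewrite | github.com/heshuis/CICAR | src/CRM-repair.py | consistentRuleSets
-- ===== SOURCE A (Python) =====
-- def areexclusive(f1,f2,controllable_feature_list):
--     if f1==f2:
--         return False
--     for cfl in controllable_feature_list:
--         if f1 in cfl and f2 in cfl:
--             return True
--     return False
--
-- def conflict(LHS1,LHS2,controllable_feature_list):
--     for l1 in LHS1:
--         for l2 in LHS2:
--             if areexclusive(l1,l2,controllable_feature_list):
--                 return True
--     return False
--
-- def consistentRuleSets(LHSs,controllable_feature_list):
--     ruleSets=[]
--     conf=False
--     for i in range(len(LHSs)-1):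
--         for j in range(i+1, len(LHSs)):
--             if conflict(LHSs[i],LHSs[j],controllable_feature_list):
--                 conf=True
--                 # construct two alternative rule sets: one without LHSs[i], one without LHSs[j]
--                 if (i>0):
--                     ruleSets.extend(consistentRuleSets(LHSs[0:i]+LHSs[i+1:len(LHSs)],controllable_feature_list))
--                 else:
--                     ruleSets.extend(consistentRuleSets(LHSs[i+1:len(LHSs)],controllable_feature_list))
--                 if (j==len(LHSs)):
--                     ruleSets.extend(consistentRuleSets(LHSs[0:len(LHSs)-1],controllable_feature_list))
--                 else:
--                     ruleSets.extend(consistentRuleSets(LHSs[0:j]+LHSs[j+1:len(LHSs)],controllable_feature_list))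
--     if not conf and LHSs!=[]:
--         ruleSets=[LHSs]
--     return ruleSets
-- ===== SOURCE B (Python) =====
-- def consistentRuleSets(LHSs, controllable_feature_list):
--     # Memoized recursion over sublists: each distinct sub-tuple of LHSs is solved once.
--     def conflict(LHS1, LHS2):
--         for l1 in LHS1:
--             for l2 in LHS2:
--                 if l1 != l2:
--                     for cfl in controllable_feature_list:
--                         if l1 in cfl and l2 in cfl:
--                             return True
--         return False
--
--     memo = {}
--
--     def solve(key):  # key: tuple of tuples of feature strings
--         if key in memo:
--             return memo[key]
--         n = len(key)
--         pairs = [(i, j) for i in range(n - 1) for j in range(i + 1, n)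
--                  if conflict(key[i], key[j])]
--         if not pairs:
--             res = [[list(t) for t in key]] if key else []
--         else:
--             res = []
--             for (i, j) in pairs:
--                 res.extend(solve(key[:i] + key[i + 1:]))
--                 res.extend(solve(key[:j] + key[j + 1:]))
--         memo[key] = res
--         return res
--
--     return solve(tuple(tuple(l) for l in LHSs))
-- ===== Notes on version B (the rewrite author's own statement) =====
-- stated objective: alternative
-- what changed: B replaces A's naive recursion (which re-solves the same sublist of rules many times) with a memoized solver keyed on the remaining rule tuple, computing each distinct sub-problem once and first collecting the conflicting index pairs instead of threading a conf flag through nested loops; intended as faster (measured 7.78x at the largest size both finished) but the returned list itself grows exponentially, so both still time out on large inputs.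
import Mathlib
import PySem

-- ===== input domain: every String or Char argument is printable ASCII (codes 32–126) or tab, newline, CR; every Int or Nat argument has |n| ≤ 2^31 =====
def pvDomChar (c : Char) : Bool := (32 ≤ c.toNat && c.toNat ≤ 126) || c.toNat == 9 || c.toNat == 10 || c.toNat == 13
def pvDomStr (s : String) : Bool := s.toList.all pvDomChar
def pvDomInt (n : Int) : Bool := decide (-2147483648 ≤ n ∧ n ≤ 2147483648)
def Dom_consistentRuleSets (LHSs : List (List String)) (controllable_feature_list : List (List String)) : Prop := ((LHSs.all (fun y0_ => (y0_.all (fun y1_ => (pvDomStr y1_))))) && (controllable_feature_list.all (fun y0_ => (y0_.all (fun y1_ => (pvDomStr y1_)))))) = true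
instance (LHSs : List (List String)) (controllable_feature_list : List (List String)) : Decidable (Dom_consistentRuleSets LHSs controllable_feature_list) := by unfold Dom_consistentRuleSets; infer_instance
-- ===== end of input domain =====

-- B memoizes A's pure recursion over sublists (each distinct sub-tuple solved once) and collects the
-- conflicting index pairs up front instead of threading a conf flag; objective: alternative (the
-- returned list itself can grow exponentially, so B is not measurably faster on large inputs).


-- ===== PORT A =====
def areexclusive (f1 f2 : String) (controllable_feature_list : List (List String)) : Bool :=
  if f1 == f2 then false
  else controllable_feature_list.any (fun cfl => cfl.contains f1 && cfl.contains f2)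

def conflict (LHS1 LHS2 : List String) (controllable_feature_list : List (List String)) : Bool :=
  LHS1.any (fun l1 => LHS2.any (fun l2 => areexclusive l1 l2 controllable_feature_list))

-- fuel = |LHSs| suffices: every recursive call drops exactly one element, so the
-- fuel-0 branch is never reached from the entry point.  The Python slices here have
-- nonnegative in-range bounds, so LHSs[0:k]+LHSs[k+1:len(LHSs)] is take k ++ drop (k+1).
def csrA (cfls : List (List String)) : Nat → List (List String) → List (List (List String))
  | 0, _ => []
  | fuel+1, LHSs =>
    let n := LHSs.length
    let st := (List.range (n-1)).foldl (fun (st : List (List (List String)) × Bool) i =>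
      (List.range' (i+1) (n-(i+1))).foldl (fun (st : List (List (List String)) × Bool) j =>
        if conflict (LHSs.getD i []) (LHSs.getD j []) cfls then
          let r1 := if i > 0 then csrA cfls fuel (LHSs.take i ++ LHSs.drop (i+1))
                    else csrA cfls fuel (LHSs.drop (i+1))
          let r2 := if j == n then csrA cfls fuel (LHSs.take (n-1))
                    else csrA cfls fuel (LHSs.take j ++ LHSs.drop (j+1))
          (st.1 ++ r1 ++ r2, true)
        else st) st) (([] : List (List (List String))), false)
    if !st.2 && !(LHSs == []) then [LHSs] else st.1

def consistentRuleSets (LHSs : List (List String)) (controllable_feature_list : List (List String)) : List (List (List String)) :=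
  csrA controllable_feature_list LHSs.length LHSs

-- ===== PORT B =====
def conflictB (cfls : List (List String)) (L1 L2 : List String) : Bool :=
  L1.any (fun l1 => L2.any (fun l2 =>
    l1 != l2 && cfls.any (fun cfl => cfl.contains l1 && cfl.contains l2)))

-- memoized solver; fuel = |key| as in port A.  Source B's keys are tuples of tuples and its
-- result entries rebuild lists from them ([list(t) for t in key]); both are value-equal
-- to the plain lists used here.
def solveB (cfls : List (List String)) :
    Nat → PySem.Dict (List (List String)) (List (List (List String))) → List (List String) →
    List (List (List String)) × PySem.Dict (List (List String)) (List (List (List String)))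
  | 0, memo, _ => ([], memo)
  | fuel+1, memo, key =>
    match memo.get? key with
    | some v => (v, memo)
    | none =>
      let n := key.length
      let pairs := (List.range (n-1)).flatMap (fun i =>
        (List.range' (i+1) (n-(i+1))).filterMap (fun j =>
          if conflictB cfls (key.getD i []) (key.getD j []) then some (i, j) else none))
      let st :=
        if pairs = [] then
          ((if key = [] then [] else [key]), memo)
        else
          pairs.foldl (fun (st : List (List (List String)) × PySem.Dict (List (List String)) (List (List (List String)))) p =>
            let r1 := solveB cfls fuel st.2 (key.take p.1 ++ key.drop (p.1+1))
            let r2 := solveB cfls fuel r1.2 (key.take p.2 ++ key.drop (p.2+1))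
            (st.1 ++ r1.1 ++ r2.1, r2.2)) (([] : List (List (List String))), memo)
      (st.1, st.2.insert key st.1)

def consistentRuleSets_alt (LHSs : List (List String)) (controllable_feature_list : List (List String)) : List (List (List String)) :=
  (solveB controllable_feature_list LHSs.length PySem.Dict.empty LHSs).1

-- ===== PRECONDITION & SPEC =====
def Spec_consistentRuleSets (LHSs : List (List String)) (controllable_feature_list : List (List String)) (out : List (List (List String))) : Prop := out = consistentRuleSets_alt LHSs controllable_feature_list
instance (LHSs : List (List String)) (controllable_feature_list : List (List String)) (out : List (List (List String))) : Decidable (Spec_consistentRuleSets LHSs controllable_feature_list out) := by unfold Spec_consistentRuleSets; infer_instance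

-- ===== CLAIM (what is proved, stated in full; the proofs are below) =====
def Claim_equal_consistentRuleSets : Prop := ∀ (LHSs : List (List String)) (controllable_feature_list : List (List String)), Dom_consistentRuleSets LHSs controllable_feature_list → Spec_consistentRuleSets LHSs controllable_feature_list (consistentRuleSets LHSs controllable_feature_list)

-- ===== LEMMAS AND PROOFS =====

-- proof-side abbreviations
def eraseAt (key : List (List String)) (i : Nat) : List (List String) :=
  key.take i ++ key.drop (i+1)

def pairsOf (cfls : List (List String)) (key : List (List String)) : List (Nat × Nat) :=
  (List.range (key.length - 1)).flatMap (fun i =>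
    (List.range' (i+1) (key.length - (i+1))).filterMap (fun j =>
      if conflict (key.getD i []) (key.getD j []) cfls then some (i, j) else none))

def F (cfls : List (List String)) (key : List (List String)) : List (List (List String)) :=
  csrA cfls key.length key

def GoodMemo (cfls : List (List String)) (m : PySem.Dict (List (List String)) (List (List (List String)))) : Prop :=
  ∀ k v, m.get? k = some v → v = F cfls k

theorem areex_eq (cfls : List (List String)) (l1 l2 : String) :
    (l1 != l2 && cfls.any (fun cfl => cfl.contains l1 && cfl.contains l2)) = areexclusive l1 l2 cfls := by
  cases h : l1 == l2 <;> simp [areexclusive, bne, h]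

theorem conflictB_eq (cfls : List (List String)) (a b : List String) :
    conflictB cfls a b = conflict a b cfls := by
  simp only [conflictB, conflict, areex_eq]

theorem fold_if_extend2 {α β : Type} (l : List α) (c : α → Bool) (u v : α → List β) :
    ∀ (acc : List β) (b : Bool),
      l.foldl (fun st x => if c x then (st.1 ++ u x ++ v x, true) else st) (acc, b)
      = (acc ++ (l.filter c).flatMap (fun x => u x ++ v x), b || l.any c) := by
  induction l with
  | nil => simp
  | cons hd tl ih =>
    intro acc b
    by_cases h : c hd
    · rw [List.foldl_cons]; simp only [h, if_true]; rw [ih]; simp [h]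
    · rw [List.foldl_cons]; simp only [h, if_false, Bool.false_eq_true]; rw [ih]; simp [h]

theorem fold_acc_or {α β : Type} (l : List α) (w : α → List β) (e : α → Bool) :
    ∀ (acc : List β) (b : Bool),
      l.foldl (fun st x => (st.1 ++ w x, st.2 || e x)) (acc, b)
      = (acc ++ l.flatMap w, b || l.any e) := by
  induction l with
  | nil => simp
  | cons hd tl ih => intro acc b; simp [ih, Bool.or_assoc]

theorem filterMap_if {α β : Type} (l : List α) (c : α → Bool) (g : α → β) :
    l.filterMap (fun x => if c x then some (g x) else none) = (l.filter c).map g := by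
  induction l with
  | nil => rfl
  | cons hd tl ih => by_cases h : c hd <;> simp [h, ih]

theorem flatMap_congr_mem {α β : Type} (l : List α) (f g : α → List β)
    (h : ∀ x ∈ l, f x = g x) : l.flatMap f = l.flatMap g := by
  induction l with
  | nil => rfl
  | cons hd tl ih => simp [h hd (by simp), ih (fun x hx => h x (by simp [hx]))]

theorem length_eraseAt (key : List (List String)) (i : Nat) (h : i < key.length) :
    (eraseAt key i).length = key.length - 1 := by
  simp [eraseAt]; omega

theorem mem_pairsOf (cfls : List (List String)) (key : List (List String)) (p : Nat × Nat)
    (h : p ∈ pairsOf cfls key) : p.1 < p.2 ∧ p.2 < key.length := by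
  simp only [pairsOf, List.mem_flatMap, List.mem_filterMap, List.mem_range, List.mem_range'_1] at h
  obtain ⟨i, hi, j, hj, hp⟩ := h
  split at hp
  · cases hp; simp; omega
  · cases hp

-- closed form of one unfolding of port A (the i>0 / j==len branches collapse: i=0 gives
-- the same slice and j=len is unreachable since j < len)
theorem csrA_closed (cfls : List (List String)) (fuel : Nat) (key : List (List String)) :
    csrA cfls (fuel+1) key =
      if pairsOf cfls key = [] then (if key = [] then [] else [key])
      else (pairsOf cfls key).flatMap
        (fun p => csrA cfls fuel (eraseAt key p.1) ++ csrA cfls fuel (eraseAt key p.2)) := by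
  rw [csrA]
  set n := key.length with hn
  set c : Nat → Nat → Bool := fun i j => conflict (key.getD i []) (key.getD j []) cfls with hc
  set u : Nat → List (List (List String)) := fun i =>
    if i > 0 then csrA cfls fuel (key.take i ++ key.drop (i+1)) else csrA cfls fuel (key.drop (i+1)) with hu
  set v : Nat → List (List (List String)) := fun j =>
    if j == n then csrA cfls fuel (key.take (n-1)) else csrA cfls fuel (key.take j ++ key.drop (j+1)) with hv
  have houter : (List.range (n-1)).foldl (fun (st : List (List (List String)) × Bool) i =>
      (List.range' (i+1) (n-(i+1))).foldl (fun (st : List (List (List String)) × Bool) j =>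
        if c i j then (st.1 ++ u i ++ v j, true) else st) st) ([], false)
      = ((List.range (n-1)).flatMap (fun i =>
           ((List.range' (i+1) (n-(i+1))).filter (c i)).flatMap (fun j => u i ++ v j)),
         (List.range (n-1)).any (fun i => (List.range' (i+1) (n-(i+1))).any (c i))) := by
    have hfun : (fun (st : List (List (List String)) × Bool) i =>
        (List.range' (i+1) (n-(i+1))).foldl (fun (st : List (List (List String)) × Bool) j =>
          if c i j then (st.1 ++ u i ++ v j, true) else st) st)
        = (fun st i => (st.1 ++ ((List.range' (i+1) (n-(i+1))).filter (c i)).flatMap (fun j => u i ++ v j),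
            st.2 || (List.range' (i+1) (n-(i+1))).any (c i))) := by
      funext st i
      rw [show st = (st.1, st.2) from rfl]
      exact fold_if_extend2 _ (c i) (fun _ => u i) v st.1 st.2
    rw [hfun, fold_acc_or]
    simp
  rw [houter]
  have hconf : ((List.range (n-1)).any (fun i => (List.range' (i+1) (n-(i+1))).any (c i)) = false)
      ↔ pairsOf cfls key = [] := by
    simp [pairsOf, filterMap_if, List.flatMap_eq_nil_iff, List.filter_eq_nil_iff, hc, ← hn]
  by_cases hpa : pairsOf cfls key = []
  · rw [if_pos hpa, hconf.mpr hpa]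
    by_cases hk : key = []
    · subst hk; simp [hn]
    · simp [hk]
  · rw [if_neg hpa]
    have hconf' : (List.range (n-1)).any (fun i => (List.range' (i+1) (n-(i+1))).any (c i)) = true := by
      cases h : (List.range (n-1)).any (fun i => (List.range' (i+1) (n-(i+1))).any (c i))
      · exact absurd (hconf.mp h) hpa
      · rfl
    rw [hconf']
    simp only [Bool.not_true, Bool.false_and, Bool.false_eq_true, if_false]
    have hrhs : pairsOf cfls key = (List.range (n-1)).flatMap (fun i =>
        ((List.range' (i+1) (n-(i+1))).filter (c i)).map (fun j => (i, j))) := by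
      simp [pairsOf, filterMap_if, hc, ← hn]
    rw [hrhs, List.flatMap_assoc]
    apply flatMap_congr_mem
    intro i hi
    rw [List.flatMap_map]
    apply flatMap_congr_mem
    intro j hj
    have hi' : i < n - 1 := List.mem_range.mp hi
    have hj' : j < n := by
      have := List.mem_range'_1.mp (List.mem_of_mem_filter hj)
      omega
    have hv' : v j = csrA cfls fuel (eraseAt key j) := by
      have hne : ¬ ((j == n) = true) := by simp; omega
      simp only [hv]
      rw [if_neg hne]
      rfl
    have hu' : u i = csrA cfls fuel (eraseAt key i) := by
      by_cases h0 : i > 0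
      · simp [hu, h0, eraseAt]
      · have : i = 0 := by omega
        subst this
        simp [hu, eraseAt]
    rw [hu', hv']

theorem csrA_fuel (cfls : List (List String)) :
    ∀ fuel key, key.length ≤ fuel → csrA cfls fuel key = F cfls key := by
  intro fuel
  induction fuel using Nat.strong_induction_on with
  | _ fuel ih =>
    intro key hk
    match fuel with
    | 0 =>
      have : key = [] := List.eq_nil_of_length_eq_zero (Nat.le_zero.mp hk)
      subst this; rfl
    | f+1 =>
      cases hkey : key with
      | nil => subst hkey; simp [F, csrA]
      | cons a tl =>
        subst hkey
        unfold F
        simp only [List.length_cons]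
        rw [csrA_closed, csrA_closed]
        by_cases hpa : pairsOf cfls (a :: tl) = []
        · rw [if_pos hpa, if_pos hpa]
        · rw [if_neg hpa, if_neg hpa]
          apply flatMap_congr_mem
          intro p hp
          obtain ⟨h12, h2⟩ := mem_pairsOf cfls (a :: tl) p hp
          have hl1 : (eraseAt (a :: tl) p.1).length = tl.length :=
            by rw [length_eraseAt _ _ (by omega)]; simp
          have hl2 : (eraseAt (a :: tl) p.2).length = tl.length :=
            by rw [length_eraseAt _ _ h2]; simp
          have hle : tl.length ≤ f := by simp at hk; omega
          rw [ih f (by omega) _ (by rw [hl1]; exact hle),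
              ih f (by omega) _ (by rw [hl2]; exact hle),
              ih tl.length (by omega) _ (by rw [hl1]),
              ih tl.length (by omega) _ (by rw [hl2])]

theorem foldB_good (cfls : List (List String)) (f : Nat) (key : List (List String))
    (hrec : ∀ memo k, k.length ≤ f → GoodMemo cfls memo →
      (solveB cfls f memo k).1 = F cfls k ∧ GoodMemo cfls (solveB cfls f memo k).2)
    (hlen : key.length ≤ f + 1) :
    ∀ (ps : List (Nat × Nat)), (∀ p ∈ ps, p.1 < key.length ∧ p.2 < key.length) →
    ∀ (acc : List (List (List String))) memo, GoodMemo cfls memo →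
      (ps.foldl (fun st p =>
          let r1 := solveB cfls f st.2 (key.take p.1 ++ key.drop (p.1+1))
          let r2 := solveB cfls f r1.2 (key.take p.2 ++ key.drop (p.2+1))
          (st.1 ++ r1.1 ++ r2.1, r2.2)) (acc, memo)).1
        = acc ++ ps.flatMap (fun p => F cfls (eraseAt key p.1) ++ F cfls (eraseAt key p.2))
      ∧ GoodMemo cfls (ps.foldl (fun st p =>
          let r1 := solveB cfls f st.2 (key.take p.1 ++ key.drop (p.1+1))
          let r2 := solveB cfls f r1.2 (key.take p.2 ++ key.drop (p.2+1))
          (st.1 ++ r1.1 ++ r2.1, r2.2)) (acc, memo)).2 := by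
  intro ps
  induction ps with
  | nil => intro _ acc memo hg; exact ⟨by simp, hg⟩
  | cons p ps ih =>
    intro hb acc memo hg
    have hp := hb p (by simp)
    have hl1 : (key.take p.1 ++ key.drop (p.1+1)).length ≤ f := by
      have := length_eraseAt key p.1 hp.1
      simp only [eraseAt] at this
      omega
    have hl2 : (key.take p.2 ++ key.drop (p.2+1)).length ≤ f := by
      have := length_eraseAt key p.2 hp.2
      simp only [eraseAt] at this
      omega
    have h1 := hrec memo (key.take p.1 ++ key.drop (p.1+1)) hl1 hg
    have h2 := hrec (solveB cfls f memo (key.take p.1 ++ key.drop (p.1+1))).2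
      (key.take p.2 ++ key.drop (p.2+1)) hl2 h1.2
    rw [List.foldl_cons]
    have hIH := ih (fun q hq => hb q (by simp [hq]))
      (acc ++ (solveB cfls f memo (key.take p.1 ++ key.drop (p.1+1))).1
           ++ (solveB cfls f (solveB cfls f memo (key.take p.1 ++ key.drop (p.1+1))).2
                (key.take p.2 ++ key.drop (p.2+1))).1)
      (solveB cfls f (solveB cfls f memo (key.take p.1 ++ key.drop (p.1+1))).2
                (key.take p.2 ++ key.drop (p.2+1))).2 h2.2
    refine ⟨?_, hIH.2⟩
    rw [hIH.1, h1.1, h2.1]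
    simp [eraseAt, List.append_assoc]

theorem solveB_good (cfls : List (List String)) :
    ∀ fuel memo key, key.length ≤ fuel → GoodMemo cfls memo →
      (solveB cfls fuel memo key).1 = F cfls key ∧ GoodMemo cfls (solveB cfls fuel memo key).2 := by
  intro fuel
  induction fuel with
  | zero =>
    intro memo key hk hg
    have : key = [] := List.eq_nil_of_length_eq_zero (Nat.le_zero.mp hk)
    subst this
    exact ⟨rfl, hg⟩
  | succ f ih =>
    intro memo key hk hg
    cases hm : memo.get? key with
    | some v =>
      rw [solveB, hm]
      exact ⟨(hg key v hm).symm ▸ rfl, hg⟩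
    | none =>
      have hstep : solveB cfls (f+1) memo key =
          (let st := if pairsOf cfls key = [] then ((if key = [] then [] else [key]), memo)
                     else (pairsOf cfls key).foldl (fun st p =>
                       let r1 := solveB cfls f st.2 (key.take p.1 ++ key.drop (p.1+1))
                       let r2 := solveB cfls f r1.2 (key.take p.2 ++ key.drop (p.2+1))
                       (st.1 ++ r1.1 ++ r2.1, r2.2)) ([], memo)
           (st.1, st.2.insert key st.1)) := by
        rw [solveB, hm]
        simp only [conflictB_eq]
        rfl
      rw [hstep]
      by_cases hpa : pairsOf cfls key = []
      · simp only [hpa, if_pos]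
        have hres : (if key = [] then ([] : List (List (List String))) else [key]) = F cfls key := by
          cases hkey : key with
          | nil => rfl
          | cons a tl =>
            rw [if_neg (by simp)]
            unfold F
            simp only [List.length_cons]
            rw [csrA_closed, if_pos (show pairsOf cfls (a :: tl) = [] by rw [← hkey]; exact hpa)]
            simp
        refine ⟨hres, ?_⟩
        intro k v hv
        rw [PySem.Dict.get?_insert] at hv
        split at hv
        · cases hv
          next heq => rw [heq, hres]
        · exact hg k v hv
      · simp only [hpa, if_false]
        have hKne : key ≠ [] := by
          intro h; apply hpa; subst h; rfl
        obtain ⟨a, tl, hkey⟩ := List.exists_cons_of_ne_nil hKne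
        have hbnd : ∀ p ∈ pairsOf cfls key, p.1 < key.length ∧ p.2 < key.length := by
          intro p hp
          have := mem_pairsOf cfls key p hp
          exact ⟨by omega, this.2⟩
        have hfold := foldB_good cfls f key ih hk (pairsOf cfls key) hbnd [] memo hg
        have hres : ((pairsOf cfls key).foldl (fun st p =>
            let r1 := solveB cfls f st.2 (key.take p.1 ++ key.drop (p.1+1))
            let r2 := solveB cfls f r1.2 (key.take p.2 ++ key.drop (p.2+1))
            (st.1 ++ r1.1 ++ r2.1, r2.2)) ([], memo)).1 = F cfls key := by
          rw [hfold.1, List.nil_append]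
          have hF : F cfls key = (pairsOf cfls key).flatMap
              (fun p => csrA cfls tl.length (eraseAt key p.1) ++ csrA cfls tl.length (eraseAt key p.2)) := by
            unfold F
            rw [hkey]
            simp only [List.length_cons]
            rw [csrA_closed, if_neg (by rw [← hkey]; exact hpa)]
          rw [hF]
          apply flatMap_congr_mem
          intro p hp
          have hb := hbnd p hp
          have hl1 : (eraseAt key p.1).length = tl.length := by
            rw [length_eraseAt key p.1 hb.1, hkey]; simp
          have hl2 : (eraseAt key p.2).length = tl.length := by
            rw [length_eraseAt key p.2 hb.2, hkey]; simp
          rw [csrA_fuel cfls tl.length _ (le_of_eq hl1),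
              csrA_fuel cfls tl.length _ (le_of_eq hl2)]
        refine ⟨hres, ?_⟩
        intro k v hv
        rw [PySem.Dict.get?_insert] at hv
        split at hv
        · cases hv
          next heq => rw [heq, hres]
        · exact hfold.2 k v hv

-- ===== VERDICT (by name: the statement is the Claim_ definition above) =====
theorem consistentRuleSets_spec : Claim_equal_consistentRuleSets := by
  intro LHSs cfls _
  unfold Spec_consistentRuleSets consistentRuleSets consistentRuleSets_alt
  have h := (solveB_good cfls LHSs.length PySem.Dict.empty LHSs le_rfl
    (by intro k v hv; simp [PySem.Dict.get?_empty] at hv)).1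
  rw [h]; rfl
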